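-- pv_equiv track=rewrite | github.com/alyssating/CS101-APTs | APT8/PositiveID.py | maximumFacts
-- ===== SOURCE A (Python) =====
-- def maximumFacts(suspects):
--     """
--     return int based on information in
--     parameter results, a list of strings
--     """
--
--     ret = []
--     for i in range(len(suspects)):
--         for x in range(len(suspects)):
--             if i != x:
--                 overlap = len(set(suspects[i].split(",")) & set(suspects[x].split(",")))
--                 ret.append(overlap)
--     if len(ret) > 0:
--         return max(ret)
--     return 0
-- ===== SOURCE B (Python) =====
-- def maximumFacts(suspects):
--     # Inverted index: each (fact, suspect-index) occurrence, facts deduped per suspect.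
--     items = []
--     for i, s in enumerate(suspects):
--         for f in dict.fromkeys(s.split(",")):
--             items.append((f, i))
--     index = {}
--     for f, i in items:
--         index.setdefault(f, []).append(i)
--     # Count shared facts fact-by-fact: for every fact, bump each unordered pair of owners.
--     pairs = {}
--     for ids in index.values():
--         pairs = _addPairs(pairs, ids)
--     return max(pairs.values(), default=0)
--
--
-- def _addPairs(pairs, ids):
--     while ids:
--         head, tail = ids[0], ids[1:]
--         for j in tail:
--             key = (head, j)
--             pairs[key] = pairs.get(key, 0) + 1
--         ids = tail
--     return pairs
-- ===== Notes on version B (the rewrite author's own statement) =====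
-- stated objective: faster
-- what changed: Replaces A's scan over all ordered suspect pairs (re-splitting and re-intersecting fact sets per pair) with an inverted index fact->owner list plus a per-fact co-occurrence counter over unordered owner pairs, returning max(counter.values(), default=0).
import Mathlib
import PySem

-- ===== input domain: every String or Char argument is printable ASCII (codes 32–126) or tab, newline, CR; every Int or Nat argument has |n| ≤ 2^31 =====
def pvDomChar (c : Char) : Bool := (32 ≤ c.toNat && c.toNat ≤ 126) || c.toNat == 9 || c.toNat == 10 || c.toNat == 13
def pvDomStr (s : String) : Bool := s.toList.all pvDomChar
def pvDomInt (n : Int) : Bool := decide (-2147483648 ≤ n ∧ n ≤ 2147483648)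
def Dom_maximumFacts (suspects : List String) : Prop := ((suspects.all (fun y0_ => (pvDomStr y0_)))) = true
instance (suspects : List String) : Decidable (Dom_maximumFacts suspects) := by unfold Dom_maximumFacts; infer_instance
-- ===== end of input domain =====

-- B replaces A's all-ordered-pairs set-intersection scan (which re-splits both strings per pair) by an
-- inverted index (fact -> owner list) plus a per-fact co-occurrence counter over unordered owner pairs;
-- each string is split and deduped once (measured faster in a timing run).

-- ===== PORT A =====
-- s.split(",") ; the separator is the non-empty literal ",", so split? is always `some`
def pvSplit (s : String) : List String := (PySem.Str.split? s ",").getD []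

-- len(set(suspects[i].split(",")) & set(suspects[x].split(",")))
def pvOv (suspects : List String) (i x : Int) : Int :=
  ((PySem.Set.inter (PySem.Set.ofList (pvSplit (PySem.List.pyGetD suspects i "")))
      (PySem.Set.ofList (pvSplit (PySem.List.pyGetD suspects x "")))).length : Int)

def maximumFacts (suspects : List String) : Int :=
  let n : Int := suspects.length
  let ret : List Int := (PySem.List.pyRange 0 n 1).foldl (fun ret i =>
      (PySem.List.pyRange 0 n 1).foldl (fun ret x =>
        if i ≠ x then ret ++ [pvOv suspects i x] else ret) ret) []
  if ret.length > 0 then (PySem.List.max? ret (fun y => y)).getD 0 else 0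

-- ===== PORT B =====
-- dict.fromkeys(s.split(",")) — the facts of one suspect, deduped, first occurrences in order
def pvFacts (s : String) : List String := PySem.List.dedup (pvSplit s)

-- _addPairs: bump the counter for every unordered pair (head, later element) of ids
def pvAddPairs : PySem.Dict (Int × Int) Int → List Int → PySem.Dict (Int × Int) Int
  | pairs, [] => pairs
  | pairs, head :: tail =>
      pvAddPairs (tail.foldl (fun d j => d.modify (head, j) 0 (· + 1)) pairs) tail

def maximumFacts_alt (suspects : List String) : Int :=
  let items : List (String × Int) := (PySem.List.enumerate suspects 0).foldl
      (fun acc p => acc ++ (pvFacts p.2).map (fun f => (f, p.1))) []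
  let index : PySem.Dict String (List Int) :=
      items.foldl (fun d p => d.modify p.1 [] (· ++ [p.2])) PySem.Dict.empty
  let pairs : PySem.Dict (Int × Int) Int :=
      index.values.foldl (fun d ids => pvAddPairs d ids) PySem.Dict.empty
  PySem.List.maxD pairs.values (fun v => v) 0

-- ===== PRECONDITION & SPEC =====
def Spec_maximumFacts (suspects : List String) (out : Int) : Prop := out = maximumFacts_alt suspects
instance (suspects : List String) (out : Int) : Decidable (Spec_maximumFacts suspects out) := by unfold Spec_maximumFacts; infer_instance

-- ===== CLAIM (what is proved, stated in full; the proofs are below) =====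
def Claim_equal_maximumFacts : Prop := ∀ (suspects : List String), Dom_maximumFacts suspects → Spec_maximumFacts suspects (maximumFacts suspects)

-- ===== LEMMAS AND PROOFS =====

-- proof-side abbreviations
def pvF (suspects : List String) (k : Nat) : List String := PySem.Set.ofList (pvSplit (suspects.getD k ""))
def pvRet (suspects : List String) : List Int :=
  (PySem.List.pyRange 0 (suspects.length : Int) 1).flatMap (fun i =>
    ((PySem.List.pyRange 0 (suspects.length : Int) 1).filter (fun x => decide ¬(i = x))).map (pvOv suspects i))
def pvItems (suspects : List String) : List (String × Int) :=
  (PySem.List.enumerate suspects 0).flatMap (fun p => (pvFacts p.2).map (fun f => (f, p.1)))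
def pvIds (suspects : List String) (f : String) : List Int :=
  ((PySem.List.enumerate suspects 0).filter (fun p => decide (f ∈ pvFacts p.2))).map (·.1)
def pvIndex (suspects : List String) : PySem.Dict String (List Int) :=
  (pvItems suspects).foldl (fun d p => d.modify p.1 [] (· ++ [p.2])) PySem.Dict.empty
def pvPairs (suspects : List String) : PySem.Dict (Int × Int) Int :=
  (pvIndex suspects).values.foldl (fun d ids => pvAddPairs d ids) PySem.Dict.empty
def pvPairList : List Int → List (Int × Int)
  | [] => []
  | h :: t => t.map (fun j => (h, j)) ++ pvPairList t
def pvAllPairs (suspects : List String) : List (Int × Int) :=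
  (pvIndex suspects).values.flatMap pvPairList

-- ==== A-side lemmas ====
lemma lem_ret (suspects : List String) :
    ((PySem.List.pyRange 0 (suspects.length : Int) 1).foldl (fun ret i =>
      (PySem.List.pyRange 0 (suspects.length : Int) 1).foldl (fun ret x =>
        if i ≠ x then ret ++ [pvOv suspects i x] else ret) ret) []) = pvRet suspects := by
  rw [PySem.List.foldl_congr_mem _ _
      (fun ret i => ret ++ ((PySem.List.pyRange 0 (suspects.length : Int) 1).filter
        (fun x => decide ¬(i = x))).map (pvOv suspects i)) _
      (fun acc i _ => by
        simpa using PySem.List.foldl_append_if (fun x => decide ¬(i = x)) (pvOv suspects i) _ acc)]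
  simpa [pvRet] using PySem.List.foldl_append_eq_flatMap
    (fun i => ((PySem.List.pyRange 0 (suspects.length : Int) 1).filter
      (fun x => decide ¬(i = x))).map (pvOv suspects i)) _ []

lemma lem_ov_nonneg (suspects : List String) (i x : Int) : 0 ≤ pvOv suspects i x := by
  simp [pvOv]

lemma lem_A_eq_fold (suspects : List String) :
    maximumFacts suspects = (pvRet suspects).foldl max 0 := by
  have hnn : ∀ v ∈ pvRet suspects, 0 ≤ v := by
    intro v hv
    simp only [pvRet, List.mem_flatMap, List.mem_map, List.mem_filter] at hv
    obtain ⟨i, -, x, -, rfl⟩ := hv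
    exact lem_ov_nonneg suspects i x
  simp only [maximumFacts, lem_ret]
  rcases h : pvRet suspects with _ | ⟨x, t⟩
  · simp
  · have hx : 0 ≤ x := hnn x (h ▸ List.mem_cons_self)
    simp [PySem.List.max?_id_cons, max_eq_right hx]

-- ==== B-side lemmas ====
lemma lem_filter_beq_of_nodup (l : List String) (h : l.Nodup) (f : String) :
    l.filter (· == f) = if f ∈ l then [f] else [] := by
  induction l with
  | nil => simp
  | cons x l ih =>
    rcases List.nodup_cons.mp h with ⟨hx, hl⟩
    by_cases hxf : x = f
    · subst hxf
      simp [ih hl, hx]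
    · simp [hxf, ih hl, Ne.symm hxf]

lemma lem_items_filter (l : List (Int × String)) (f : String) :
    ((l.flatMap (fun p => (pvFacts p.2).map (fun g => (g, p.1)))).filter (fun q => q.1 == f)).map (·.2)
      = (l.filter (fun p => decide (f ∈ pvFacts p.2))).map (·.1) := by
  induction l with
  | nil => simp
  | cons p l ih =>
    have hnd : (pvFacts p.2).Nodup := by
      simp only [pvFacts, PySem.List.dedup_eq_ofList]
      exact PySem.Set.nodup_ofList _
    have hhead : (((pvFacts p.2).map (fun g => (g, p.1))).filter (fun q => q.1 == f)).map (·.2)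
        = if f ∈ pvFacts p.2 then [p.1] else [] := by
      rw [List.filter_map]
      have : ((fun q : String × Int => q.1 == f) ∘ (fun g => (g, p.1))) = (· == f) := rfl
      rw [this, lem_filter_beq_of_nodup _ hnd]
      by_cases hf : f ∈ pvFacts p.2 <;> simp [hf]
    simp only [List.flatMap_cons, List.filter_append, List.map_append, ih, List.filter_cons, hhead]
    by_cases hf : f ∈ pvFacts p.2 <;> simp [hf]

lemma lem_items (suspects : List String) :
    ((PySem.List.enumerate suspects 0).foldl
      (fun acc p => acc ++ (pvFacts p.2).map (fun f => (f, p.1))) []) = pvItems suspects := by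
  simpa [pvItems] using PySem.List.foldl_append_eq_flatMap
    (fun p => (pvFacts p.2).map (fun f => (f, p.1))) (PySem.List.enumerate suspects 0) []

lemma lem_index_getD (suspects : List String) (f : String) :
    (pvIndex suspects).getD f [] = pvIds suspects f := by
  unfold pvIndex pvIds
  rw [PySem.Dict.getD_foldl_modify_append]
  simp only [PySem.Dict.getD_empty, List.nil_append, pvItems]
  exact lem_items_filter _ f

lemma lem_index_keys_nodup (suspects : List String) : (pvIndex suspects).keys.Nodup := by
  unfold pvIndex
  exact PySem.Dict.nodup_keys_foldl_modify_key _ (fun p : String × Int => p.1) []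
    (fun (_ : PySem.Dict String (List Int)) (p : String × Int) => (· ++ [p.2])) _
    (by simp [PySem.Dict.keys_empty])

lemma lem_mem_index_keys (suspects : List String) (f : String) :
    f ∈ (pvIndex suspects).keys ↔ ∃ k, ∃ _ : k < suspects.length, f ∈ pvF suspects k := by
  unfold pvIndex
  rw [PySem.Dict.keys_foldl_modify_key (pvItems suspects) (fun p : String × Int => p.1) []
    (fun (_ : PySem.Dict String (List Int)) (p : String × Int) => (· ++ [p.2])) PySem.Dict.empty]
  rw [PySem.Dict.keys_empty, PySem.Set.update_nil_left, PySem.Set.mem_ofList]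
  simp only [List.mem_map, pvItems, List.mem_flatMap, PySem.List.mem_enumerate_iff]
  constructor
  · rintro ⟨q, ⟨p, ⟨k, hk, rfl⟩, hq⟩, rfl⟩
    obtain ⟨g, hg, rfl⟩ := hq
    exact ⟨k, hk, by
      simpa [pvF, pvFacts, PySem.List.dedup_eq_ofList, List.getD_eq_getElem?_getD,
        List.getElem?_eq_getElem hk] using hg⟩
  · rintro ⟨k, hk, hf⟩
    refine ⟨(f, (k : Int)), ⟨((k : Int), suspects[k]), ⟨k, hk, by simp⟩, ?_⟩, rfl⟩
    exact ⟨f, by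
      simpa [pvF, pvFacts, PySem.List.dedup_eq_ofList, List.getD_eq_getElem?_getD,
        List.getElem?_eq_getElem hk] using hf, rfl⟩

lemma lem_facts_bridge (suspects : List String) (k : Nat) (hk : k < suspects.length) :
    pvFacts suspects[k] = pvF suspects k := by
  simp [pvF, pvFacts, PySem.List.dedup_eq_ofList, List.getD_eq_getElem?_getD,
    List.getElem?_eq_getElem hk]

lemma lem_mem_ids (suspects : List String) (f : String) (i : Int) :
    i ∈ pvIds suspects f ↔ ∃ k, ∃ _ : k < suspects.length, i = (k : Int) ∧ f ∈ pvF suspects k := by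
  unfold pvIds
  simp only [List.mem_map, List.mem_filter, PySem.List.mem_enumerate_iff]
  constructor
  · rintro ⟨p, ⟨⟨k, hk, rfl⟩, hp⟩, rfl⟩
    refine ⟨k, hk, by simp, ?_⟩
    rw [← lem_facts_bridge suspects k hk]
    simpa using hp
  · rintro ⟨k, hk, rfl, hf⟩
    refine ⟨((k : Int), suspects[k]), ⟨⟨k, hk, by simp⟩, ?_⟩, rfl⟩
    rw [← lem_facts_bridge suspects k hk] at hf
    simpa using hf

lemma lem_ids_pairwise (suspects : List String) (f : String) :
    (pvIds suspects f).Pairwise (· < ·) := by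
  unfold pvIds
  rw [List.pairwise_map]
  exact List.Pairwise.filter _ (PySem.List.pairwise_lt_enumerate suspects 0)

lemma lem_addPairs_getD (d : PySem.Dict (Int × Int) Int) (ids : List Int) (k : Int × Int) :
    (pvAddPairs d ids).getD k 0 = d.getD k 0 + ((pvPairList ids).count k : Int) := by
  induction ids generalizing d with
  | nil => simp [pvAddPairs, pvPairList]
  | cons h t ih =>
    rw [pvAddPairs, ih]
    rw [show t.foldl (fun d j => d.modify (h, j) 0 (· + 1)) d
        = (t.map (fun j => (h, j))).foldl (fun d x => d.modify x 0 (· + 1)) d from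
      by rw [List.foldl_map]]
    rw [PySem.Dict.getD_foldl_modify_add_one]
    simp only [pvPairList, List.count_append]
    push_cast
    ring

lemma lem_addPairs_keys (d : PySem.Dict (Int × Int) Int) (ids : List Int) :
    (pvAddPairs d ids).keys = PySem.Set.update d.keys (pvPairList ids) := by
  induction ids generalizing d with
  | nil => simp [pvAddPairs, pvPairList, PySem.Set.update_nil]
  | cons h t ih =>
    rw [pvAddPairs, ih]
    rw [PySem.Dict.keys_foldl_modify_key t (fun j => ((h, j) : Int × Int)) 0 (fun _ _ => (· + 1)) d]
    simp only [pvPairList]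
    rw [PySem.Set.update_append]

lemma lem_pairs_getD (suspects : List String) (k : Int × Int) :
    (pvPairs suspects).getD k 0 = ((pvAllPairs suspects).count k : Int) := by
  have gen : ∀ (L : List (List Int)) (d : PySem.Dict (Int × Int) Int),
      (L.foldl (fun d ids => pvAddPairs d ids) d).getD k 0
        = d.getD k 0 + ((L.flatMap pvPairList).count k : Int) := by
    intro L
    induction L with
    | nil => simp
    | cons ids L ih =>
      intro d
      simp only [List.foldl_cons, ih, lem_addPairs_getD, List.flatMap_cons, List.count_append]
      push_cast
      ring
  simpa [pvPairs, pvAllPairs] using gen (pvIndex suspects).values PySem.Dict.empty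

lemma lem_pairs_keys (suspects : List String) :
    (pvPairs suspects).keys = PySem.Set.ofList (pvAllPairs suspects) := by
  have gen : ∀ (L : List (List Int)) (d : PySem.Dict (Int × Int) Int),
      (L.foldl (fun d ids => pvAddPairs d ids) d).keys
        = PySem.Set.update d.keys (L.flatMap pvPairList) := by
    intro L
    induction L with
    | nil => intro d; simp [PySem.Set.update_nil]
    | cons ids L ih =>
      intro d
      simp only [List.foldl_cons, ih, lem_addPairs_keys, List.flatMap_cons]
      rw [PySem.Set.update_append]
  rw [pvPairs, gen, PySem.Dict.keys_empty, PySem.Set.update_nil_left, pvAllPairs]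

lemma lem_pairList_mem (ids : List Int) (x : Int × Int) (hx : x ∈ pvPairList ids) :
    x.1 ∈ ids ∧ x.2 ∈ ids := by
  induction ids with
  | nil => simp [pvPairList] at hx
  | cons h t ih =>
    simp only [pvPairList, List.mem_append, List.mem_map] at hx
    rcases hx with ⟨j, hj, rfl⟩ | hx
    · exact ⟨List.mem_cons_self, List.mem_cons_of_mem _ hj⟩
    · exact ⟨List.mem_cons_of_mem _ (ih hx).1, List.mem_cons_of_mem _ (ih hx).2⟩

lemma lem_pairList_nodup (ids : List Int) (h : ids.Pairwise (· < ·)) :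
    (pvPairList ids).Nodup := by
  induction ids with
  | nil => simp [pvPairList]
  | cons h₀ t ih =>
    rcases List.pairwise_cons.mp h with ⟨hh, ht⟩
    have htn : t.Nodup := ht.imp ne_of_lt
    simp only [pvPairList]
    refine List.Nodup.append (htn.map ?_) (ih ht) ?_
    · intro a b hab
      simpa using hab
    · intro x hx1 hx2
      simp only [List.mem_map] at hx1
      obtain ⟨j, hj, rfl⟩ := hx1
      have := (lem_pairList_mem t _ hx2).1
      exact absurd (hh _ this) (lt_irrefl h₀)

lemma lem_mem_pairList (ids : List Int) (h : ids.Pairwise (· < ·)) (i j : Int) :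
    (i, j) ∈ pvPairList ids ↔ i ∈ ids ∧ j ∈ ids ∧ i < j := by
  induction ids with
  | nil => simp [pvPairList]
  | cons h₀ t ih =>
    rcases List.pairwise_cons.mp h with ⟨hh, ht⟩
    simp only [pvPairList, List.mem_append, List.mem_map, List.mem_cons, ih ht, Prod.mk.injEq]
    constructor
    · rintro (⟨j', hj', rfl, rfl⟩ | ⟨hi, hj, hij⟩)
      · exact ⟨Or.inl rfl, Or.inr hj', hh _ hj'⟩
      · exact ⟨Or.inr hi, Or.inr hj, hij⟩
    · rintro ⟨hi | hi, hj | hj, hij⟩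
      · exact absurd (hi ▸ hj ▸ hij) (lt_irrefl _)
      · exact Or.inl ⟨j, hj, hi.symm, rfl⟩
      · exact absurd (lt_trans (hj ▸ hij) (hh _ hi)) (lt_irrefl _)
      · exact Or.inr ⟨hi, hj, hij⟩

lemma lem_count_pairList (ids : List Int) (h : ids.Pairwise (· < ·)) (k : Int × Int) :
    (pvPairList ids).count k = if k ∈ pvPairList ids then 1 else 0 := by
  by_cases hk : k ∈ pvPairList ids
  · rw [List.count_eq_one_of_mem (lem_pairList_nodup ids h) hk, if_pos hk]
  · rw [List.count_eq_zero_of_not_mem hk, if_neg hk]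

lemma lem_count_flatMap (l : List String) (g : String → List (Int × Int)) (k : Int × Int) :
    (l.flatMap g).count k = (l.map (fun f => (g f).count k)).sum := by
  induction l with
  | nil => simp
  | cons a l ih => simp [List.count_append, ih]

lemma lem_values (suspects : List String) :
    (pvIndex suspects).values = (pvIndex suspects).keys.map (pvIds suspects) := by
  rw [PySem.Dict.values_eq_map_keys _ (lem_index_keys_nodup suspects) []]
  simp [lem_index_getD]

lemma lem_mem_ids_nat (suspects : List String) (f : String) (k : Nat) (hk : k < suspects.length) :
    (k : Int) ∈ pvIds suspects f ↔ f ∈ pvF suspects k := by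
  rw [lem_mem_ids]
  constructor
  · rintro ⟨k', hk', heq, hf⟩
    rwa [show k' = k from by exact_mod_cast heq.symm] at hf
  · intro hf
    exact ⟨k, hk, rfl, hf⟩

lemma lem_inter_len_symm (s t : List String) (hs : s.Nodup) (ht : t.Nodup) :
    (PySem.Set.inter s t).length = (PySem.Set.inter t s).length := by
  refine ((List.perm_ext_iff_of_nodup (PySem.Set.nodup_inter s t hs) (PySem.Set.nodup_inter t s ht)).2 ?_).length_eq
  intro x
  rw [PySem.Set.mem_inter, PySem.Set.mem_inter]
  exact and_comm

-- the central count: for i < j the pair counter equals the intersection size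
lemma lem_count_eq_ov (suspects : List String) (ki kj : Nat)
    (hki : ki < suspects.length) (hkj : kj < suspects.length) (hij : (ki : Int) < kj) :
    ((pvAllPairs suspects).count ((ki : Int), (kj : Int)) : Int) = pvOv suspects ki kj := by
  have hcount : (pvAllPairs suspects).count ((ki : Int), (kj : Int))
      = ((pvIndex suspects).keys.filter
          (fun f => decide (f ∈ pvF suspects ki) && decide (f ∈ pvF suspects kj))).length := by
    rw [pvAllPairs, lem_values, List.flatMap_map, lem_count_flatMap]
    rw [List.map_congr_left (g := fun f =>
        if f ∈ pvF suspects ki ∧ f ∈ pvF suspects kj then 1 else 0) ?_]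
    · rw [show (fun f => if f ∈ pvF suspects ki ∧ f ∈ pvF suspects kj then 1 else 0)
          = (fun f => if ((decide (f ∈ pvF suspects ki) && decide (f ∈ pvF suspects kj)) = true)
              then 1 else 0) from by funext f; simp, PySem.List.sum_map_ite_one_zero_nat,
        List.countP_eq_length_filter]
    · intro f _
      rw [lem_count_pairList _ (lem_ids_pairwise suspects f)]
      simp only [lem_mem_pairList _ (lem_ids_pairwise suspects f),
        lem_mem_ids_nat suspects f ki hki, lem_mem_ids_nat suspects f kj hkj]
      by_cases h1 : f ∈ pvF suspects ki <;> by_cases h2 : f ∈ pvF suspects kj <;>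
        simp [h1, h2, hij]
  have hov : pvOv suspects ki kj
      = (((pvF suspects ki).filter (fun f => decide (f ∈ pvF suspects kj))).length : Int) := by
    have hnat : PySem.Set.inter (PySem.Set.ofList (pvSplit (suspects.getD ki "")))
          (PySem.Set.ofList (pvSplit (suspects.getD kj "")))
        = (pvF suspects ki).filter (fun f => decide (f ∈ pvF suspects kj)) := by
      simp only [PySem.Set.inter, pvF]
      exact List.filter_congr (fun x _ => by simp [PySem.Set.contains_eq_listContains])
    simp only [pvOv, PySem.List.pyGetD_natCast, hnat]
  rw [hcount, hov]
  congr 1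
  refine ((List.perm_ext_iff_of_nodup ((lem_index_keys_nodup suspects).filter _)
      (List.Nodup.filter _ (by rw [pvF]; exact PySem.Set.nodup_ofList _))).2 ?_).length_eq
  intro f
  simp only [List.mem_filter, Bool.and_eq_true, decide_eq_true_eq]
  constructor
  · rintro ⟨-, h1, h2⟩
    exact ⟨h1, h2⟩
  · rintro ⟨h1, h2⟩
    exact ⟨(lem_mem_index_keys suspects f).2 ⟨ki, hki, h1⟩, h1, h2⟩

lemma lem_ov_symm (suspects : List String) (i x : Int) :
    pvOv suspects i x = pvOv suspects x i := by
  simp only [pvOv]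
  congr 1
  exact lem_inter_len_symm _ _ (PySem.Set.nodup_ofList _) (PySem.Set.nodup_ofList _)

lemma lem_B_eq_fold (suspects : List String) :
    maximumFacts_alt suspects = ((pvPairs suspects).values).foldl max 0 := by
  have hstep : maximumFacts_alt suspects
      = PySem.List.maxD (pvPairs suspects).values (fun v => v) 0 := by
    simp only [maximumFacts_alt, lem_items]
    rfl
  have hnn : ∀ v ∈ (pvPairs suspects).values, 0 ≤ v := by
    intro v hv
    rw [PySem.Dict.values_eq_map_keys _ (by
        rw [lem_pairs_keys]; exact PySem.Set.nodup_ofList _) 0] at hv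
    simp only [List.mem_map] at hv
    obtain ⟨k, -, rfl⟩ := hv
    rw [lem_pairs_getD]
    positivity
  rw [hstep]
  rcases h : (pvPairs suspects).values with _ | ⟨x, t⟩
  · have hnone : (PySem.List.max? ([] : List Int) (fun v => v)) = none := by
      rw [PySem.List.max?_eq_none_iff]
    simp [PySem.List.maxD, hnone]
  · have hx : 0 ≤ x := hnn x (h ▸ List.mem_cons_self)
    simp [PySem.List.maxD, PySem.List.max?_id_cons, max_eq_right hx]

lemma lem_mem_allPairs (suspects : List String) (i j : Int) :
    (i, j) ∈ pvAllPairs suspects →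
      ∃ ki kj : Nat, ∃ _ : ki < suspects.length, ∃ _ : kj < suspects.length,
        i = (ki : Int) ∧ j = (kj : Int) ∧ i < j := by
  intro hmem
  rw [pvAllPairs, lem_values] at hmem
  simp only [List.flatMap_map, List.mem_flatMap] at hmem
  obtain ⟨f, -, hp⟩ := hmem
  rw [lem_mem_pairList _ (lem_ids_pairwise suspects f)] at hp
  obtain ⟨hi, hj, hij⟩ := hp
  obtain ⟨ki, hki, rfl, -⟩ := (lem_mem_ids suspects f i).1 hi
  obtain ⟨kj, hkj, rfl, -⟩ := (lem_mem_ids suspects f j).1 hj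
  exact ⟨ki, kj, hki, hkj, rfl, rfl, hij⟩

lemma lem_ov_le_fold (suspects : List String) (ki kj : Nat)
    (hki : ki < suspects.length) (hkj : kj < suspects.length) (hij : (ki : Int) < (kj : Int)) :
    pvOv suspects ki kj ≤ ((pvPairs suspects).values).foldl max 0 := by
  by_cases hz : pvOv suspects ki kj ≤ 0
  · exact le_trans hz (PySem.List.le_foldl_max _ 0).1
  · rw [not_le] at hz
    have hcnt := lem_count_eq_ov suspects ki kj hki hkj hij
    have hc : 0 < (pvAllPairs suspects).count ((ki : Int), (kj : Int)) := by
      have : (0 : Int) < ((pvAllPairs suspects).count ((ki : Int), (kj : Int)) : Int) :=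
        hcnt ▸ hz
      exact_mod_cast this
    have hkey : (((ki : Int), (kj : Int)) : Int × Int) ∈ (pvPairs suspects).keys := by
      rw [lem_pairs_keys, PySem.Set.mem_ofList]
      exact List.count_pos_iff.mp hc
    have hval : (pvPairs suspects).getD ((ki : Int), (kj : Int)) 0 ∈ (pvPairs suspects).values := by
      rw [PySem.Dict.values_eq_map_keys _ (by
          rw [lem_pairs_keys]; exact PySem.Set.nodup_ofList _) 0]
      exact List.mem_map_of_mem hkey
    have hov : pvOv suspects ki kj = (pvPairs suspects).getD ((ki : Int), (kj : Int)) 0 := by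
      rw [lem_pairs_getD, hcnt]
    rw [hov]
    exact (PySem.List.le_foldl_max _ 0).2 _ hval

lemma lem_ov_mem_ret (suspects : List String) (i x : Int)
    (hi0 : 0 ≤ i) (hin : i < (suspects.length : Int))
    (hx0 : 0 ≤ x) (hxn : x < (suspects.length : Int)) (hne : i ≠ x) :
    pvOv suspects i x ∈ pvRet suspects := by
  unfold pvRet
  refine List.mem_flatMap.mpr ⟨i, PySem.List.mem_pyRange_one.mpr ⟨hi0, hin⟩,
    List.mem_map.mpr ⟨x, List.mem_filter.mpr ⟨PySem.List.mem_pyRange_one.mpr ⟨hx0, hxn⟩, ?_⟩, rfl⟩⟩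
  simpa using hne

lemma lem_mem_ret_elim (suspects : List String) (v : Int) (hv : v ∈ pvRet suspects) :
    ∃ ki kx : Nat, ki < suspects.length ∧ kx < suspects.length ∧
      ((ki : Int) ≠ (kx : Int)) ∧ v = pvOv suspects ki kx := by
  obtain ⟨i, hiR, hmap⟩ := List.mem_flatMap.mp hv
  obtain ⟨x, hxf, hveq⟩ := List.mem_map.mp hmap
  obtain ⟨hxR, hdec⟩ := List.mem_filter.mp hxf
  obtain ⟨hi0, hin⟩ := PySem.List.mem_pyRange_one.mp hiR
  obtain ⟨hx0, hxn⟩ := PySem.List.mem_pyRange_one.mp hxR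
  have hne : i ≠ x := by simpa using hdec
  obtain ⟨ki, rfl⟩ := Int.eq_ofNat_of_zero_le hi0
  obtain ⟨kx, rfl⟩ := Int.eq_ofNat_of_zero_le hx0
  exact ⟨ki, kx, by exact_mod_cast hin, by exact_mod_cast hxn, hne, hveq.symm⟩

-- ===== VERDICT (by name: the statement is the Claim_ definition above) =====
theorem maximumFacts_spec : Claim_equal_maximumFacts := by
  intro suspects _
  show maximumFacts suspects = maximumFacts_alt suspects
  rw [lem_A_eq_fold, lem_B_eq_fold]
  apply le_antisymm
  · rcases PySem.List.foldl_max_mem (pvRet suspects) 0 with h0 | hmem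
    · rw [h0]; exact (PySem.List.le_foldl_max _ 0).1
    · obtain ⟨ki, kx, hkin, hkxn, hne, hveq⟩ := lem_mem_ret_elim suspects _ hmem
      rw [hveq]
      rcases lt_or_gt_of_ne hne with hlt | hgt
      · exact lem_ov_le_fold suspects ki kx hkin hkxn hlt
      · rw [lem_ov_symm]
        exact lem_ov_le_fold suspects kx ki hkxn hkin hgt
  · have hnod : (pvPairs suspects).keys.Nodup := by
      rw [lem_pairs_keys]; exact PySem.Set.nodup_ofList _
    rw [PySem.Dict.values_eq_map_keys _ hnod 0]
    rcases PySem.List.foldl_max_mem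
        ((pvPairs suspects).keys.map (fun k => (pvPairs suspects).getD k 0)) 0 with h0 | hmem
    · rw [h0]; exact (PySem.List.le_foldl_max _ 0).1
    · simp only [List.mem_map] at hmem
      obtain ⟨k, hk, heq⟩ := hmem
      rw [lem_pairs_keys, PySem.Set.mem_ofList] at hk
      obtain ⟨ki, kj, hki, hkj, hik, hjk, hij⟩ := lem_mem_allPairs suspects k.1 k.2 (by
        simpa using hk)
      have hk2 : k = (((ki : Nat) : Int), ((kj : Nat) : Int)) := Prod.ext_iff.mpr ⟨hik, hjk⟩
      rw [← heq, hk2, lem_pairs_getD,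
        lem_count_eq_ov suspects ki kj hki hkj (by rw [← hik, ← hjk]; exact hij)]
      refine (PySem.List.le_foldl_max _ 0).2 _ (lem_ov_mem_ret suspects _ _ ?_ ?_ ?_ ?_ ?_)
      · exact Int.natCast_nonneg ki
      · exact_mod_cast hki
      · exact Int.natCast_nonneg kj
      · exact_mod_cast hkj
      · exact ne_of_lt (by rw [← hik, ← hjk]; exact hij)
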